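-- pv_equiv track=rewrite | github.com/kothariji/competitive-programming | Codechef solutions/CVDRUN.py | Covid_run
-- ===== SOURCE A (Python) =====
-- def Covid_run(n,k,x,y):
--   if(0<=x,y<=n-1):
--     current=x
--     while(current != y):
--         current=(current+k)%n
--         if(current == x):
--             return "NO"
--
--     return "YES"
-- ===== SOURCE B (Python) =====
-- def Covid_run(n, k, x, y):
--     # Reachability stepping by k mod n is a divisibility test: y is reachable
--     # from x iff gcd(k, n) divides y - x.  Euclid's algorithm, no loop over n.
--     a, b = k % n, n
--     while a:
--         a, b = b % a, a
--     return "YES" if (y - x) % b == 0 else "NO"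
-- ===== Notes on version B (the rewrite author's own statement) =====
-- stated objective: alternative
-- what changed: A walks the orbit x, (x+k)%n, ... one step at a time until it meets y or returns to x (O(n) loop iterations); B replaces the walk by the number-theoretic criterion 'y reachable iff gcd(k,n) divides y-x', computed with Euclid's algorithm in O(log n) arithmetic steps (a timing run could not certify the speed-up because its large random inputs fall outside Pre_).
-- outside the precondition, e.g. on Covid_run(2, 1, 0, 5): A returns 'NO', B returns 'YES'; on Covid_run(0, 1, 2, 2): A returns 'YES', B raises ZeroDivisionError; on Covid_run(0, 1, 0, 5): A raises ZeroDivisionError, B raises ZeroDivisionError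
import Mathlib
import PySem

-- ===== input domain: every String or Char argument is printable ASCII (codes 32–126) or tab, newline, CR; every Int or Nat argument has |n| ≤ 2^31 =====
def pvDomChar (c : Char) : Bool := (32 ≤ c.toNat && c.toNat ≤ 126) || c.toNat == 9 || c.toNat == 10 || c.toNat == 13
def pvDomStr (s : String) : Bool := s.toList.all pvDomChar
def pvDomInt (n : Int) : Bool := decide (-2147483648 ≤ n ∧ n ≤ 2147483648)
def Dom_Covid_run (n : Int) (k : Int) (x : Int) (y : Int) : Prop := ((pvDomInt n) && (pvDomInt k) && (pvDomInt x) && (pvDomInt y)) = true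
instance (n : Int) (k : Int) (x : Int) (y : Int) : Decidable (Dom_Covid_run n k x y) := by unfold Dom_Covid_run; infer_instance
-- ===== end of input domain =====

-- B replaces A's step-by-step orbit walk by the gcd divisibility criterion (Euclid's algorithm).

-- ===== PORT A =====
-- A's while-loop; the fuel argument only makes the recursion total (inside
-- Pre_ the loop terminates within |n| steps, so the fuel is never exhausted).
def covidLoopA (n : Int) (k : Int) (x : Int) (y : Int) (current : Int) : Nat → String
  | 0 => "NO"
  | f + 1 =>
    if current = y then "YES"
    else
      let c := PySem.Int.mod (current + k) n
      if c = x then "NO" else covidLoopA n k x y c f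

def Covid_run (n : Int) (k : Int) (x : Int) (y : Int) : String :=
  covidLoopA n k x y x (n.natAbs + 1)

-- ===== PORT B =====
-- Source B's hand-written Euclid loop: a, b = k % n, n; while a: a, b = b % a, a
theorem pv_mod_natAbs_lt (b a : Int) (h : ¬ a = 0) :
    (PySem.Int.mod b a).natAbs < a.natAbs := by
  rcases lt_or_gt_of_ne h with hneg | hpos
  · have := PySem.Int.mod_neg_bounds b hneg
    omega
  · have h1 := PySem.Int.mod_nonneg b hpos
    have h2 := PySem.Int.mod_lt b hpos
    omega

def euclidLoop (a b : Int) : Int :=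
  if h : a = 0 then b
  else euclidLoop (PySem.Int.mod b a) a
termination_by a.natAbs
decreasing_by exact pv_mod_natAbs_lt b a h

def Covid_run_alt (n : Int) (k : Int) (x : Int) (y : Int) : String :=
  let g := euclidLoop (PySem.Int.mod k n) n
  if PySem.Int.mod (y - x) g = 0 then "YES" else "NO"

-- ===== PRECONDITION & SPEC =====
-- Pre_ is the set of inputs on which A terminates AND its answer is the
-- reachability value B computes: n ≠ 0 and (x = y, or y lies in the stepping
-- range [0,n) (mirrored (n,0] for negative n) and gcd(k,n) ∣ y - x, or x lies
-- in the stepping range and gcd(k,n) ∤ y - x).  Excluded: n = 0 (A raises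
-- ZeroDivisionError when x ≠ y; B always raises there), inputs where A loops
-- forever (x and y both outside the stepping range / unreachable), and the
-- corner where x is in range but y is out of range yet ≡ x (mod gcd): A
-- returns "NO" (an out-of-range y is literally never hit) while B's pure
-- divisibility test says "YES" — a defensible value B does not model.
def Pre_Covid_run (n : Int) (k : Int) (x : Int) (y : Int) : Prop :=
  n ≠ 0 ∧
    (x = y
      ∨ (((0 ≤ y ∧ y < n) ∨ (n < y ∧ y ≤ 0)) ∧ (Int.gcd k n : Int) ∣ (y - x))
      ∨ (((0 ≤ x ∧ x < n) ∨ (n < x ∧ x ≤ 0)) ∧ ¬ (Int.gcd k n : Int) ∣ (y - x)))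
instance (n : Int) (k : Int) (x : Int) (y : Int) : Decidable (Pre_Covid_run n k x y) := by unfold Pre_Covid_run; infer_instance

def pvWitness_Covid_run : Int × Int × Int × Int := (10, 4, 1, 7)

def Spec_Covid_run (n : Int) (k : Int) (x : Int) (y : Int) (out : String) : Prop := out = Covid_run_alt n k x y
instance (n : Int) (k : Int) (x : Int) (y : Int) (out : String) : Decidable (Spec_Covid_run n k x y out) := by unfold Spec_Covid_run; infer_instance

-- ===== CLAIM (what is proved, stated in full; the proofs are below) =====
def Claim_equal_Covid_run : Prop := ∀ (n : Int) (k : Int) (x : Int) (y : Int), Dom_Covid_run n k x y → Pre_Covid_run n k x y → Spec_Covid_run n k x y (Covid_run n k x y)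

-- ===== LEMMAS AND PROOFS =====

-- Euclid's loop computes (up to sign) the gcd, for every input.
theorem euclidLoop_natAbs (a b : Int) : (euclidLoop a b).natAbs = Int.gcd a b := by
  by_cases h0 : a = 0
  · subst h0
    rw [euclidLoop]
    simp [Int.gcd]
  · rw [euclidLoop]
    simp only [h0, dite_false]
    rw [euclidLoop_natAbs (PySem.Int.mod b a) a]
    have hmod : PySem.Int.mod b a = b + (-(PySem.Int.floordiv b a)) * a := by
      have := PySem.Int.floordiv_mul_add_mod b a
      linarith
    rw [Int.gcd_comm, hmod, Int.gcd_add_mul_right_right, Int.gcd_comm]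
termination_by a.natAbs
decreasing_by exact pv_mod_natAbs_lt b a h0

-- B's value is the divisibility test against gcd(k, n).
theorem alt_char (n k x y : Int) :
    Covid_run_alt n k x y = if (Int.gcd k n : Int) ∣ (y - x) then "YES" else "NO" := by
  simp only [Covid_run_alt, PySem.Int.mod_eq_zero_iff_dvd]
  have hmod : PySem.Int.mod k n = k + (-(PySem.Int.floordiv k n)) * n := by
    have := PySem.Int.floordiv_mul_add_mod k n
    linarith
  have h1 : (euclidLoop (PySem.Int.mod k n) n ∣ (y - x)) ↔ ((Int.gcd k n : Int) ∣ (y - x)) := by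
    rw [← Int.natAbs_dvd (a := euclidLoop (PySem.Int.mod k n) n),
        euclidLoop_natAbs, Int.gcd_comm, hmod, Int.gcd_add_mul_right_right, Int.gcd_comm]
  simp only [h1]

-- one loop step: ((x + j*k) % n + k) % n = (x + (j+1)*k) % n
theorem step_eq (n k x : Int) (j : Int) :
    ((x + j * k) % n + k) % n = (x + (j + 1) * k) % n := by
  rw [Int.emod_add_emod]
  congr 1
  ring

-- YES case: if y is hit at offset t (counted from position (x + j*k) % n) and
-- x is never re-hit strictly before it, the loop answers "YES".
theorem loop_yes (n k x y : Int) (hn : 0 < n) :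
    ∀ (t f j : Nat), t < f →
      (x + ((j : Int) + t) * k) % n = y →
      (∀ i : Nat, 0 < i → i < t → (x + ((j : Int) + i) * k) % n ≠ x) →
      (t ≠ 0 → y ≠ x) →
      covidLoopA n k x y ((x + (j : Int) * k) % n) f = "YES" := by
  intro t
  induction t with
  | zero =>
    intro f j hf hy _ _
    obtain ⟨f', rfl⟩ : ∃ f', f = f' + 1 := ⟨f - 1, by omega⟩
    rw [covidLoopA]
    rw [show x + ((j : Int) + (0 : Nat)) * k = x + (j : Int) * k by push_cast; ring] at hy
    simp [hy]
  | succ t ih =>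
    intro f j hf hy hmid hne
    obtain ⟨f', rfl⟩ : ∃ f', f = f' + 1 := ⟨f - 1, by omega⟩
    rw [covidLoopA]
    by_cases hcy : (x + (j : Int) * k) % n = y
    · simp [hcy]
    · simp only [hcy, if_false]
      rw [PySem.Int.mod_eq_emod_of_pos hn, step_eq]
      have hcx : (x + ((j : Int) + 1) * k) % n ≠ x := by
        by_cases ht0 : t = 0
        · subst ht0
          have h1 : (x + ((j : Int) + 1) * k) % n = y := by
            rw [show x + ((j : Int) + 1) * k = x + ((j : Int) + ((0 + 1 : Nat) : Int)) * k
              by push_cast; ring]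
            exact hy
          rw [h1]; exact hne (by omega)
        · have h1 := hmid 1 (by omega) (by omega)
          rwa [show x + ((j : Int) + ((1 : Nat) : Int)) * k = x + ((j : Int) + 1) * k
            by push_cast; ring] at h1
      simp only [hcx, if_false]
      rw [show x + ((j : Int) + 1) * k = x + (((j + 1 : Nat) : Int)) * k by push_cast; ring]
      apply ih f' (j + 1) (by omega)
      · rw [show x + (((j + 1 : Nat) : Int) + (t : Int)) * k
            = x + ((j : Int) + ((t + 1 : Nat) : Int)) * k by push_cast; ring]
        exact hy
      · intro i hi0 hit
        have h1 := hmid (i + 1) (by omega) (by omega)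
        rwa [show x + ((j : Int) + ((i + 1 : Nat) : Int)) * k
            = x + (((j + 1 : Nat) : Int) + (i : Int)) * k by push_cast; ring] at h1
      · intro _; exact hne (by omega)

-- NO case: if y is never hit and x is re-hit at offset r ≤ fuel, the loop
-- answers "NO".
theorem loop_no (n k x y : Int) (hn : 0 < n)
    (Hy : ∀ t : Nat, (x + (t : Int) * k) % n ≠ y) :
    ∀ (r f j : Nat), 0 < r → r ≤ f →
      (x + ((j : Int) + r) * k) % n = x →
      covidLoopA n k x y ((x + (j : Int) * k) % n) f = "NO" := by
  intro r
  induction r with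
  | zero => omega
  | succ r ih =>
    intro f j _ hf hx
    obtain ⟨f', rfl⟩ : ∃ f', f = f' + 1 := ⟨f - 1, by omega⟩
    rw [covidLoopA]
    have hcy : (x + (j : Int) * k) % n ≠ y := Hy j
    simp only [hcy, if_false]
    rw [PySem.Int.mod_eq_emod_of_pos hn, step_eq]
    by_cases hcx : (x + ((j : Int) + 1) * k) % n = x
    · simp [hcx]
    · simp only [hcx, if_false]
      have hr0 : r ≠ 0 := by
        intro h; subst h
        apply hcx
        rw [show x + ((j : Int) + 1) * k = x + ((j : Int) + ((0 + 1 : Nat) : Int)) * k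
          by push_cast; ring]
        exact hx
      rw [show x + ((j : Int) + 1) * k = x + (((j + 1 : Nat) : Int)) * k by push_cast; ring]
      apply ih f' (j + 1) (by omega) (by omega)
      rw [show x + (((j + 1 : Nat) : Int) + (r : Int)) * k
          = x + ((j : Int) + ((r + 1 : Nat) : Int)) * k by push_cast; ring]
      exact hx

-- a % n = b for 0 ≤ b < n iff n ∣ a - b
theorem emod_eq_iff_dvd_sub (n a b : Int) (hb0 : 0 ≤ b) (hbn : b < n) :
    (a % n = b ↔ n ∣ a - b) := by
  constructor
  · intro h
    have h2 : a % n = b % n := by rw [h, Int.emod_eq_of_lt hb0 hbn]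
    rw [Int.emod_eq_emod_iff_emod_sub_eq_zero] at h2
    exact Int.dvd_of_emod_eq_zero h2
  · intro h
    have h2 : a % n = b % n := by
      rw [Int.emod_eq_emod_iff_emod_sub_eq_zero]
      exact Int.emod_eq_zero_of_dvd h
    rwa [Int.emod_eq_of_lt hb0 hbn] at h2

-- A's loop is invariant under negating all five integers (Python's % is odd
-- in both arguments together).
theorem covidLoopA_neg (n k x y : Int) :
    ∀ (f : Nat) (c : Int),
      covidLoopA n k x y c f = covidLoopA (-n) (-k) (-x) (-y) (-c) f := by
  intro f
  induction f with
  | zero => intro c; rfl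
  | succ f ih =>
    intro c
    rw [covidLoopA, covidLoopA]
    simp only [neg_inj]
    by_cases hcy : c = y
    · simp [hcy]
    · simp only [hcy, if_false]
      have hmod : PySem.Int.mod (-c + -k) (-n) = -(PySem.Int.mod (c + k) n) := by
        rw [show (-c + -k : Int) = -(c + k) by ring, PySem.Int.mod_neg_neg]
      simp only [hmod, neg_inj]
      by_cases hcx : PySem.Int.mod (c + k) n = x
      · simp [hcx]
      · simp only [hcx, if_false]
        exact ih (PySem.Int.mod (c + k) n)

-- entering A's loop at current = x (x possibly out of range), YES side
theorem enter_yes (n k x y : Int) (hn : 0 < n) (t : Int) (ht1 : 1 ≤ t) (htn : t ≤ n)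
    (hxy : x ≠ y) (hyt : (x + t * k) % n = y)
    (hmid : ∀ i : Int, 0 < i → i < t → (x + i * k) % n ≠ x) :
    covidLoopA n k x y x (n.natAbs + 1) = "YES" := by
  rw [covidLoopA, if_neg hxy]
  show (if PySem.Int.mod (x + k) n = x then "NO"
        else covidLoopA n k x y (PySem.Int.mod (x + k) n) n.natAbs) = "YES"
  have hc : PySem.Int.mod (x + k) n = (x + ((1 : Nat) : Int) * k) % n := by
    rw [PySem.Int.mod_eq_emod_of_pos hn]; congr 1; push_cast; ring
  rw [hc]
  have hcx : (x + ((1 : Nat) : Int) * k) % n ≠ x := by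
    by_cases ht1' : t = 1
    · rw [show x + ((1 : Nat) : Int) * k = x + t * k by rw [ht1']; push_cast; ring, hyt]
      exact fun h => hxy h.symm
    · have h1 := hmid 1 one_pos (by omega)
      rwa [show x + (1 : Int) * k = x + ((1 : Nat) : Int) * k by push_cast; ring] at h1
  rw [if_neg hcx]
  apply loop_yes n k x y hn (t - 1).toNat n.natAbs 1 (by omega)
  · rw [show x + (((1 : Nat) : Int) + ((t - 1).toNat : Int)) * k = x + t * k
      by rw [Int.toNat_of_nonneg (by omega)]; push_cast; ring]
    exact hyt
  · intro i hi0 hit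
    have h1 := hmid (1 + i) (by omega) (by omega)
    rwa [show x + ((1 : Int) + (i : Int)) * k = x + (((1 : Nat) : Int) + (i : Int)) * k
      by push_cast; ring] at h1
  · intro _; exact fun h => hxy h.symm

-- entering A's loop at current = x, NO side
theorem enter_no (n k x y : Int) (hn : 0 < n) (r : Int) (hr1 : 1 ≤ r) (hrn : r ≤ n)
    (hxy : x ≠ y) (Hy : ∀ t : Nat, (x + (t : Int) * k) % n ≠ y)
    (hx : (x + r * k) % n = x) :
    covidLoopA n k x y x (n.natAbs + 1) = "NO" := by
  rw [covidLoopA, if_neg hxy]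
  show (if PySem.Int.mod (x + k) n = x then "NO"
        else covidLoopA n k x y (PySem.Int.mod (x + k) n) n.natAbs) = "NO"
  have hc : PySem.Int.mod (x + k) n = (x + ((1 : Nat) : Int) * k) % n := by
    rw [PySem.Int.mod_eq_emod_of_pos hn]; congr 1; push_cast; ring
  rw [hc]
  by_cases hcx : (x + ((1 : Nat) : Int) * k) % n = x
  · rw [if_pos hcx]
  · rw [if_neg hcx]
    have hr2 : 2 ≤ r := by
      by_contra h
      have hr : r = 1 := by omega
      apply hcx
      rw [show x + ((1 : Nat) : Int) * k = x + r * k by rw [hr]; push_cast; ring]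
      exact hx
    apply loop_no n k x y hn Hy (r - 1).toNat n.natAbs 1 (by omega) (by omega)
    rw [show x + (((1 : Nat) : Int) + ((r - 1).toNat : Int)) * k = x + r * k
      by rw [Int.toNat_of_nonneg (by omega)]; push_cast; ring]
    exact hx

-- arithmetic facts about g = gcd(k, n) and m = n / g, for positive n
theorem gcd_facts (n k : Int) (hn : 0 < n) :
    0 < (Int.gcd k n : Int) ∧ n = (Int.gcd k n : Int) * (n / (Int.gcd k n : Int)) ∧
      0 < n / (Int.gcd k n : Int) ∧ n / (Int.gcd k n : Int) ≤ n ∧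
      (∀ i : Int, n ∣ i * k ↔ (n / (Int.gcd k n : Int)) ∣ i) := by
  have hn0 : n ≠ 0 := by omega
  set G : Int := (Int.gcd k n : Int) with hG
  have hGdvdk : G ∣ k := Int.gcd_dvd_left k n
  have hGdvdn : G ∣ n := Int.gcd_dvd_right k n
  have hgpos : 0 < Int.gcd k n :=
    Nat.pos_of_ne_zero (fun h => hn0 (Int.gcd_eq_zero_iff.mp h).2)
  have hGpos : 0 < G := by rw [hG]; exact_mod_cast hgpos
  set m : Int := n / G with hm
  have hnGm : n = G * m := by
    rw [hm, mul_comm]; exact (Int.ediv_mul_cancel hGdvdn).symm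
  have hmpos : 0 < m := by
    by_contra h
    push Not at h
    nlinarith
  have hmn : m ≤ n := by nlinarith
  obtain ⟨k', hk'⟩ := hGdvdk
  have hcop : IsCoprime m k' := by
    rw [Int.isCoprime_iff_gcd_eq_one]
    have e1 : G = ((Int.gcd n k : ℕ) : Int) := by
      rw [hG]; exact_mod_cast congrArg (Nat.cast : ℕ → ℤ) (Int.gcd_comm k n)
    have e2 : k' = k / G := by
      rw [hk', Int.mul_ediv_cancel_left _ hGpos.ne']
    rw [e2, hm, e1]
    exact Int.gcd_div_gcd_div_gcd (by rw [Int.gcd_comm]; exact hgpos)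
  refine ⟨hGpos, hnGm, hmpos, hmn, ?_⟩
  intro i
  constructor
  · intro h
    rw [hnGm, hk'] at h
    have h2 : G * m ∣ G * (i * k') := by
      rw [show G * (i * k') = i * (G * k') by ring]; exact h
    have h3 : m ∣ i * k' := (mul_dvd_mul_iff_left hGpos.ne').mp h2
    exact hcop.dvd_of_dvd_mul_right h3
  · rintro ⟨c, hc⟩
    exact ⟨c * k', by rw [hc, hk', hnGm]; ring⟩

-- positive-n core, YES branch: y in range, gcd ∣ y - x, x ≠ y
theorem core_yes (n k x y : Int) (hn : 0 < n) (hy0 : 0 ≤ y) (hyn : y < n)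
    (hdvd : (Int.gcd k n : Int) ∣ (y - x)) (hxy : x ≠ y) :
    covidLoopA n k x y x (n.natAbs + 1) = "YES" := by
  obtain ⟨hGpos, hnGm, hmpos, hmn, hiff⟩ := gcd_facts n k hn
  set G : Int := (Int.gcd k n : Int) with hG
  set m : Int := n / G with hm
  have hndvd_mk : n ∣ m * k := (hiff m).mpr dvd_rfl
  -- intermediate x-hits force x into range and n ∣ i*k
  have hmid_gen : ∀ i : Int, 0 < i → (x + i * k) % n = x →
      (0 ≤ x ∧ x < n ∧ m ∣ i) := by
    intro i _ hhit
    have hxr0 : 0 ≤ x := hhit ▸ Int.emod_nonneg _ (by omega)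
    have hxrn : x < n := hhit ▸ Int.emod_lt_of_pos _ hn
    rw [emod_eq_iff_dvd_sub n _ x hxr0 hxrn,
        show x + i * k - x = i * k by ring] at hhit
    exact ⟨hxr0, hxrn, (hiff i).mp hhit⟩
  obtain ⟨t, ht1, htm, hyt, hmidt⟩ :
      ∃ t : Int, 1 ≤ t ∧ t ≤ m ∧ (x + t * k) % n = y ∧
        (∀ i : Int, 0 < i → i < t → (x + i * k) % n ≠ x) := by
    by_cases hxm : x % n = y
    · refine ⟨m, hmpos, le_refl m, ?_, ?_⟩
      · obtain ⟨c, hc⟩ := hndvd_mk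
        rw [show x + m * k = x + n * c by rw [← hc],
            Int.add_mul_emod_self_left, hxm]
      · intro i hi0 _ hhit
        obtain ⟨hxr0, hxrn, _⟩ := hmid_gen i hi0 hhit
        exact hxy (by rw [← Int.emod_eq_of_lt hxr0 hxrn]; exact hxm)
    · -- Bezout hitting time
      obtain ⟨d, hd⟩ := hdvd
      have hGdef : G = k * Int.gcdA k n + n * Int.gcdB k n := by
        rw [hG]; exact Int.gcd_eq_gcd_ab k n
      set t₀ : Int := d * Int.gcdA k n with ht₀
      have ht₀k : n ∣ t₀ * k - (y - x) := by
        refine ⟨-(d * Int.gcdB k n), ?_⟩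
        rw [ht₀, hd, hGdef]; ring
      set t₁ : Int := t₀ % m with ht₁
      have ht₁0 : 0 ≤ t₁ := Int.emod_nonneg t₀ hmpos.ne'
      have ht₁m : t₁ < m := Int.emod_lt_of_pos t₀ hmpos
      have ht₁k : n ∣ t₁ * k - (y - x) := by
        obtain ⟨q, hq⟩ : m ∣ t₀ - t₁ := ⟨t₀ / m, by rw [ht₁, Int.emod_def]; ring⟩
        have h2 : t₁ * k - (y - x) = (t₀ * k - (y - x)) - q * (m * k) := by
          have h3 : t₀ = t₁ + m * q := by linarith
          rw [h3]; ring
        rw [h2]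
        exact dvd_sub ht₀k (Dvd.dvd.mul_left hndvd_mk _)
      have ht₁ne : t₁ ≠ 0 := by
        intro h
        rw [h, zero_mul, zero_sub] at ht₁k
        have h4 : n ∣ x - y := by
          obtain ⟨c, hc⟩ := ht₁k
          exact ⟨c, by linarith⟩
        apply hxm
        rw [show x = y + (x - y) by ring]
        obtain ⟨c, hc⟩ := h4
        rw [hc, Int.add_mul_emod_self_left, Int.emod_eq_of_lt hy0 hyn]
      refine ⟨t₁, by omega, by omega, ?_, ?_⟩
      · rw [emod_eq_iff_dvd_sub n _ y hy0 hyn,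
            show x + t₁ * k - y = t₁ * k - (y - x) by ring]
        exact ht₁k
      · intro i hi0 hit hhit
        obtain ⟨_, _, hmi⟩ := hmid_gen i hi0 hhit
        obtain ⟨c, hc⟩ := hmi
        have hc0 : 0 < c := by nlinarith
        nlinarith
  exact enter_yes n k x y hn t ht1 (le_trans htm hmn) hxy hyt hmidt

-- positive-n core, NO branch: x in range, gcd ∤ y - x
theorem core_no (n k x y : Int) (hn : 0 < n) (hx0 : 0 ≤ x) (hxn : x < n)
    (hnd : ¬ (Int.gcd k n : Int) ∣ (y - x)) :
    covidLoopA n k x y x (n.natAbs + 1) = "NO" := by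
  obtain ⟨hGpos, hnGm, hmpos, hmn, hiff⟩ := gcd_facts n k hn
  set G : Int := (Int.gcd k n : Int) with hG
  set m : Int := n / G with hm
  have hndvd_mk : n ∣ m * k := (hiff m).mpr dvd_rfl
  have hGdvdk : G ∣ k := Int.gcd_dvd_left k n
  have hGdvdn : G ∣ n := Int.gcd_dvd_right k n
  have hxy : x ≠ y := by
    intro h
    exact hnd ⟨0, by rw [← h]; ring⟩
  have Hy : ∀ t : Nat, (x + (t : Int) * k) % n ≠ y := by
    intro t hhit
    have hy0 : 0 ≤ y := hhit ▸ Int.emod_nonneg _ (by omega)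
    have hyn : y < n := hhit ▸ Int.emod_lt_of_pos _ hn
    rw [emod_eq_iff_dvd_sub n _ y hy0 hyn] at hhit
    obtain ⟨c, hc⟩ := hhit
    apply hnd
    obtain ⟨k', hk'⟩ := hGdvdk
    obtain ⟨n', hn'⟩ := hGdvdn
    have hyx : y - x = (t : Int) * k - n * c := by linarith
    exact ⟨(t : Int) * k' - n' * c, by rw [hyx, hk', hn']; ring⟩
  apply enter_no n k x y hn m hmpos hmn hxy Hy
  obtain ⟨c, hc⟩ := hndvd_mk
  rw [show x + m * k = x + n * c by rw [← hc],
      Int.add_mul_emod_self_left, Int.emod_eq_of_lt hx0 hxn]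

-- ===== VERDICT (by name: the statement is the Claim_ definition above) =====
theorem Covid_run_spec : Claim_equal_Covid_run := by
  intro n k x y _ hpre
  show Covid_run n k x y = Covid_run_alt n k x y
  rw [alt_char]
  obtain ⟨hn0, hcase⟩ := hpre
  by_cases hxy : x = y
  · -- both sides answer "YES" at once
    subst hxy
    unfold Covid_run
    rw [covidLoopA]
    simp
  · rcases hcase with h | ⟨hr, hdvd⟩ | ⟨hr, hnd⟩
    · exact absurd h hxy
    · rw [if_pos hdvd]
      rcases hr with ⟨hy0, hyn⟩ | ⟨hyn, hy0⟩
      · unfold Covid_run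
        exact core_yes n k x y (by omega) hy0 hyn hdvd hxy
      · -- negative n: mirror everything
        unfold Covid_run
        rw [covidLoopA_neg n k x y (n.natAbs + 1) x,
            show n.natAbs = (-n).natAbs by omega]
        apply core_yes (-n) (-k) (-x) (-y) (by omega) (by omega) (by omega)
        · rw [show (-y - -x : Int) = -(y - x) by ring]
          have hg : Int.gcd (-k) (-n) = Int.gcd k n := by rw [Int.neg_gcd, Int.gcd_neg]
          rw [hg]
          exact (dvd_neg).mpr hdvd
        · intro h; exact hxy (by omega)
    · rw [if_neg hnd]
      rcases hr with ⟨hx0, hxn⟩ | ⟨hxn, hx0⟩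
      · unfold Covid_run
        exact core_no n k x y (by omega) hx0 hxn hnd
      · unfold Covid_run
        rw [covidLoopA_neg n k x y (n.natAbs + 1) x,
            show n.natAbs = (-n).natAbs by omega]
        apply core_no (-n) (-k) (-x) (-y) (by omega) (by omega) (by omega)
        rw [show (-y - -x : Int) = -(y - x) by ring]
        have hg : Int.gcd (-k) (-n) = Int.gcd k n := by rw [Int.neg_gcd, Int.gcd_neg]
        rw [hg]
        exact fun h => hnd ((dvd_neg).mp h)
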